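-- pv_equiv track=rewrite | github.com/B-Varshith/Clause-Boundary-Detection | src/clause_labeler.py | get_subtree_ids
-- ===== SOURCE A (Python) =====
-- from typing import List, Dict, Tuple, Set, Any
--
-- def get_subtree_ids(token_id: int, children_map: Dict[int, List[int]],
--                      exclude_ids: Set[int] = None) -> Set[int]:
--     """
--     Get all token IDs in the subtree rooted at token_id.
--     Optionally excludes tokens belonging to specified subtrees.
--
--     Args:
--         token_id: Root of the subtree
--         children_map: Mapping from head to children
--         exclude_ids: Set of token IDs to exclude (nested clause heads)
--
--     Returns:
--         Set of token IDs in the subtree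
--     """
--     if exclude_ids is None:
--         exclude_ids = set()
--
--     result = {token_id}
--     if token_id in children_map:
--         for child_id in children_map[token_id]:
--             if child_id not in exclude_ids:
--                 result.update(get_subtree_ids(child_id, children_map, exclude_ids))
--     return result
-- ===== SOURCE B (Python) =====
-- def get_subtree_ids(token_id, children_map, exclude_ids=None):
--     if exclude_ids is None:
--         exclude_ids = set()
--     result = set()
--     stack = [token_id]
--     while stack:
--         node = stack.pop()
--         result.add(node)
--         kids = children_map.get(node, [])
--         stack.extend(c for c in reversed(kids) if c not in exclude_ids)
--     return result
-- ===== Notes on version B (the rewrite author's own statement) =====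
-- stated objective: alternative
-- what changed: A's recursive per-subtree set construction is replaced by an iterative DFS with an explicit stack and a single result set grown in place (no recursion, no intermediate sets).
import Mathlib
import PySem

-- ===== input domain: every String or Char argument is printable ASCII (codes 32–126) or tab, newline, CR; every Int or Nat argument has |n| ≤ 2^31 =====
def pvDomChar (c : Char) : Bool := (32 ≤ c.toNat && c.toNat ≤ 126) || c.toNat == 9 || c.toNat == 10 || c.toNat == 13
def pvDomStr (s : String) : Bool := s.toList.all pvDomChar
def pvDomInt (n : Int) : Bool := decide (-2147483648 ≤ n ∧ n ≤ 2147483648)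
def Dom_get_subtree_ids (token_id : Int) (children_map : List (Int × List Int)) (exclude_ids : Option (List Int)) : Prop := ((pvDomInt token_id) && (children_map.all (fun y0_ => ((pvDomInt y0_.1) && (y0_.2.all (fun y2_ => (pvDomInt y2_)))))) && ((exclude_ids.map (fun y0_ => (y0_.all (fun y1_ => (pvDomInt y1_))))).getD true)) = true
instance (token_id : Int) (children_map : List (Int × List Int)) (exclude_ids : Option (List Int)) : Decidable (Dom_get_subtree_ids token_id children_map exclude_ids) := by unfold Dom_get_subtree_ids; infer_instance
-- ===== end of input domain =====

-- B replaces A's recursive subtree collection by an iterative explicit-stack DFS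
-- (objective: alternative decomposition, same asymptotic cost; return value only — neither mutates its arguments).

-- ===== PORT A =====
-- A's recursion is fuelled for totality: under Pre_ (the recursion terminates in Python)
-- fuel children_map.length + 1 is never exhausted, since every recursion path has
-- pairwise-distinct nodes and every non-terminal node is a key of the map.
def aRec (ex : List Int) (cm : List (Int × List Int)) : Nat → Int → PySem.Set Int
  | 0, t => PySem.Set.ofList [t]            -- fuel guard only; unreachable under Pre_
  | n + 1, t =>
    match List.lookup t cm with             -- `if token_id in children_map: children_map[token_id]` (first match per the dict convention)
    | none => PySem.Set.ofList [t]
    | some kids =>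
      kids.foldl (fun acc c => if ex.contains c then acc else PySem.Set.update acc (aRec ex cm n c))
        (PySem.Set.ofList [t])

def get_subtree_ids (token_id : Int) (children_map : List (Int × List Int)) (exclude_ids : Option (List Int)) : List Int :=
  aRec (match exclude_ids with | none => [] | some s => s) children_map (children_map.length + 1) token_id

-- ===== PORT B =====
-- children_map.get(node, [])
def pvKids (cm : List (Int × List Int)) (u : Int) : List Int := (List.lookup u cm).getD []

-- fuel for Source B's while-loop (totality device only: the exact number of pops the loop performs
-- when it terminates, = size of the re-exploring DFS stream)
def pvCost (ex : List Int) (cm : List (Int × List Int)) : Nat → Int → Nat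
  | 0, _ => 1
  | n + 1, u => 1 + (((pvKids cm u).filter (fun c => !ex.contains c)).map (pvCost ex cm n)).sum

-- the while-loop; the stack's head is its top (Python's `stack.extend(reversed-filtered kids)`
-- puts the first child on top, i.e. prepends the filtered children in order)
def bLoop (ex : List Int) (cm : List (Int × List Int)) : Nat → List Int → PySem.Set Int → PySem.Set Int
  | 0, _, r => r
  | _ + 1, [], r => r
  | n + 1, u :: rest, r =>
    bLoop ex cm n (((pvKids cm u).filter (fun c => !ex.contains c)) ++ rest) (PySem.Set.add r u)

def get_subtree_ids_alt (token_id : Int) (children_map : List (Int × List Int)) (exclude_ids : Option (List Int)) : List Int :=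
  let ex := match exclude_ids with | none => [] | some s => s
  bLoop ex children_map (pvCost ex children_map (children_map.length + 1) token_id) [token_id] PySem.Set.empty

-- ===== PRECONDITION & SPEC =====
-- depth check mirroring the termination of A's recursion (depth bound, NOT the computation)
def pvDepthOk (ex : List Int) (cm : List (Int × List Int)) : Nat → Int → Bool
  | 0, _ => false
  | n + 1, u => ((pvKids cm u).filter (fun c => !ex.contains c)).all (pvDepthOk ex cm n)

-- Pre_ excludes exactly the children_map graphs on which A's recursion never terminates
-- (a cycle reachable from token_id through non-excluded edges: Python raises RecursionError there);
-- on every terminating input the recursion depth is ≤ children_map.length + 1, so Pre_ holds.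
def Pre_get_subtree_ids (token_id : Int) (children_map : List (Int × List Int)) (exclude_ids : Option (List Int)) : Prop :=
  pvDepthOk (exclude_ids.getD []) children_map (children_map.length + 1) token_id = true
instance (token_id : Int) (children_map : List (Int × List Int)) (exclude_ids : Option (List Int)) : Decidable (Pre_get_subtree_ids token_id children_map exclude_ids) := by unfold Pre_get_subtree_ids; infer_instance

def pvWitness_get_subtree_ids : Int × (List (Int × List Int)) × Option (List Int) :=
  (1, [(1, [2, 3]), (2, [4, 5]), (3, [6])], some [3])

def Spec_get_subtree_ids (token_id : Int) (children_map : List (Int × List Int)) (exclude_ids : Option (List Int)) (out : List Int) : Prop := out = get_subtree_ids_alt token_id children_map exclude_ids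
instance (token_id : Int) (children_map : List (Int × List Int)) (exclude_ids : Option (List Int)) (out : List Int) : Decidable (Spec_get_subtree_ids token_id children_map exclude_ids out) := by unfold Spec_get_subtree_ids; infer_instance

-- ===== CLAIM (what is proved, stated in full; the proofs are below) =====
def Claim_equal_get_subtree_ids : Prop := ∀ (token_id : Int) (children_map : List (Int × List Int)) (exclude_ids : Option (List Int)), Dom_get_subtree_ids token_id children_map exclude_ids → Pre_get_subtree_ids token_id children_map exclude_ids → Spec_get_subtree_ids token_id children_map exclude_ids (get_subtree_ids token_id children_map exclude_ids)

-- ===== LEMMAS AND PROOFS =====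

theorem pv_update_add (r s : List Int) (x : Int) :
    PySem.Set.update r (PySem.Set.add s x) = PySem.Set.add (PySem.Set.update r s) x := by
  by_cases h : x ∈ s
  · rw [PySem.Set.add_of_mem h, PySem.Set.add_of_mem]
    exact (PySem.Set.mem_update _ _ _).mpr (Or.inr h)
  · rw [PySem.Set.add_of_not_mem h, PySem.Set.update_append, PySem.Set.update_cons,
      PySem.Set.update_nil, PySem.Set.add_eq_ite]

theorem pv_update_update (r s u : List Int) :
    PySem.Set.update r (PySem.Set.update s u) = PySem.Set.update (PySem.Set.update r s) u := by
  induction u generalizing s with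
  | nil => rw [PySem.Set.update_nil, PySem.Set.update_nil]
  | cons x xs ih =>
    rw [PySem.Set.update_cons, PySem.Set.update_cons, ih, pv_update_add]

theorem pv_update_foldl (g : Int → PySem.Set Int) (l : List Int) (r s : List Int) :
    PySem.Set.update r (l.foldl (fun a c => PySem.Set.update a (g c)) s)
      = l.foldl (fun a c => PySem.Set.update a (g c)) (PySem.Set.update r s) := by
  induction l generalizing s with
  | nil => rfl
  | cons c cs ih => simp only [List.foldl_cons]; rw [ih, pv_update_update]

theorem pv_foldl_if_filter (ex : List Int) (g : Int → PySem.Set Int) (l : List Int) (s : PySem.Set Int) :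
    l.foldl (fun a c => if ex.contains c then a else PySem.Set.update a (g c)) s
      = (l.filter (fun c => !ex.contains c)).foldl (fun a c => PySem.Set.update a (g c)) s := by
  induction l generalizing s with
  | nil => rfl
  | cons c cs ih =>
    simp only [List.foldl_cons, List.filter_cons]
    cases h : ex.contains c with
    | true =>
      simp only [Bool.not_true, reduceIte]
      exact ih s
    | false =>
      simp only [Bool.not_false, reduceIte]
      exact ih (PySem.Set.update s (g c))

-- A's result after one unfolding, written over the filtered child list
theorem pv_aRec_succ (ex : List Int) (cm : List (Int × List Int)) (n : Nat) (t : Int) :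
    aRec ex cm (n + 1) t
      = ((pvKids cm t).filter (fun c => !ex.contains c)).foldl
          (fun a c => PySem.Set.update a (aRec ex cm n c)) (PySem.Set.ofList [t]) := by
  cases h : List.lookup t cm with
  | none => simp [aRec, h, pvKids]
  | some kids => simp only [aRec, pvKids, h, Option.getD_some]; rw [pv_foldl_if_filter]

theorem pv_aRec_nodup (ex : List Int) (cm : List (Int × List Int)) (n : Nat) (t : Int) :
    (aRec ex cm n t).Nodup := by
  induction n generalizing t with
  | zero => simp [aRec, PySem.Set.ofList]
  | succ n ih =>
    rw [pv_aRec_succ]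
    have : ∀ (l : List Int) (s : PySem.Set Int), s.Nodup →
        (l.foldl (fun a c => PySem.Set.update a (aRec ex cm n c)) s).Nodup := by
      intro l
      induction l with
      | nil => intro s hs; exact hs
      | cons c cs ihl =>
        intro s hs
        exact ihl _ (PySem.Set.nodup_update _ _ hs)
    exact this _ _ (by simp [PySem.Set.ofList])

theorem pv_update_singleton (r : List Int) (t : Int) :
    PySem.Set.update r (PySem.Set.ofList [t]) = PySem.Set.add r t := by
  rfl

-- key invariant: popping u with exactly its DFS-stream cost of fuel folds u's whole
-- A-subtree into the result set
theorem pv_key (ex : List Int) (cm : List (Int × List Int)) :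
    ∀ (n : Nat) (u : Int), pvDepthOk ex cm n u = true →
      ∀ (rest : List Int) (F : Nat) (r : PySem.Set Int),
        bLoop ex cm (pvCost ex cm n u + F) (u :: rest) r
          = bLoop ex cm F rest (PySem.Set.update r (aRec ex cm n u)) := by
  intro n
  induction n with
  | zero => intro u h; simp [pvDepthOk] at h
  | succ n ih =>
    intro u h rest F r
    have hkids : ∀ c ∈ (pvKids cm u).filter (fun c => !ex.contains c),
        pvDepthOk ex cm n c = true := by
      intro c hc
      simpa using (List.all_eq_true.mp (by simpa [pvDepthOk] using h)) c hc
    have hfold : ∀ (l : List Int), (∀ c ∈ l, pvDepthOk ex cm n c = true) →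
        ∀ (rest : List Int) (F : Nat) (r : PySem.Set Int),
          bLoop ex cm ((l.map (pvCost ex cm n)).sum + F) (l ++ rest) r
            = bLoop ex cm F rest (l.foldl (fun a c => PySem.Set.update a (aRec ex cm n c)) r) := by
      intro l
      induction l with
      | nil => intro _ rest F r; simp
      | cons c cs ihl =>
        intro hall rest F r
        have h1 : ((c :: cs).map (pvCost ex cm n)).sum + F
            = pvCost ex cm n c + ((cs.map (pvCost ex cm n)).sum + F) := by
          simp [List.map_cons, List.sum_cons]; omega
        rw [h1, List.cons_append, ih c (hall c (by simp)) (cs ++ rest)]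
        rw [ihl (fun c hc => hall c (by simp [hc])) rest F]
        simp [List.foldl_cons]
    have hstep : pvCost ex cm (n + 1) u + F
        = ((((pvKids cm u).filter (fun c => !ex.contains c)).map (pvCost ex cm n)).sum + F) + 1 := by
      simp [pvCost]; omega
    rw [hstep]
    show bLoop ex cm (_ + 1) (u :: rest) r = _
    rw [bLoop]
    rw [hfold _ hkids rest F (PySem.Set.add r u)]
    rw [pv_aRec_succ, pv_update_foldl, pv_update_singleton]

-- A's recursive value equals B's loop value, given the depth bound
theorem pv_main (ex : List Int) (cm : List (Int × List Int)) (t : Int)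
    (h : pvDepthOk ex cm (cm.length + 1) t = true) :
    aRec ex cm (cm.length + 1) t
      = bLoop ex cm (pvCost ex cm (cm.length + 1) t) [t] PySem.Set.empty := by
  have hk := pv_key ex cm (cm.length + 1) t h [] 0 PySem.Set.empty
  rw [Nat.add_zero] at hk
  rw [hk]
  show _ = PySem.Set.update PySem.Set.empty (aRec ex cm (cm.length + 1) t)
  have hempty : (PySem.Set.empty : PySem.Set Int) = [] := rfl
  rw [hempty, PySem.Set.update_nil_left,
    PySem.Set.ofList_eq_self_of_nodup _ (pv_aRec_nodup ex cm _ _)]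

-- ===== VERDICT (by name: the statement is the Claim_ definition above) =====
theorem get_subtree_ids_spec : Claim_equal_get_subtree_ids := by
  intro token_id children_map exclude_ids _ hpre
  unfold Pre_get_subtree_ids at hpre
  unfold Spec_get_subtree_ids get_subtree_ids get_subtree_ids_alt
  cases exclude_ids with
  | none => exact pv_main _ _ _ (by simpa using hpre)
  | some s => exact pv_main _ _ _ (by simpa using hpre)
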